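-- pv_equiv track=rewrite | github.com/IFC-Roofing/sup-api-code | pdf-generator/flow_package.py | _build_tag_catalogue
-- ===== SOURCE A (Python) =====
-- def _build_tag_catalogue(bid_cards: list, bids: list) -> dict:
--     """
--     Build a dict of available @tags for this project with descriptions.
--     Sources: existing Flow bid cards + pipeline bids.
--
--     Returns: {"@shingle_roof": "Shingle Roof", "@gutter": "Gutters — Grizzly Fence", ...}
--     """
--     catalogue = {}
--     for card in bid_cards:
--         tag = card.get("tag")
--         if not tag:
--             continue
--         label = (card.get("content") or card.get("description") or
--                  card.get("trade_production_notes") or tag.lstrip("@").replace("_", " ").title())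
--         if tag in catalogue:
--             catalogue[tag] += f" / {label}"
--         else:
--             catalogue[tag] = label
--
--     for bid in bids:
--         tag = bid.get("trade")
--         if not tag or tag in catalogue:
--             continue
--         scope = bid.get("scope") or tag.lstrip("@").replace("_", " ").title()
--         catalogue[tag] = scope
--
--     return catalogue
-- ===== SOURCE B (Python) =====
-- def _build_tag_catalogue(bid_cards: list, bids: list) -> dict:
--     # Per-tag gather: enumerate the distinct tags first, then build each
--     # catalogue entry in one shot from all matching records.
--     def derived(tag):
--         return tag.lstrip("@").replace("_", " ").title()
--
--     card_tags = []
--     for card in bid_cards: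
--         t = card.get("tag")
--         if t and t not in card_tags:
--             card_tags.append(t)
--
--     catalogue = {
--         t: " / ".join(
--             c.get("content") or c.get("description") or
--             c.get("trade_production_notes") or derived(t)
--             for c in bid_cards if c.get("tag") == t)
--         for t in card_tags
--     }
--
--     new_trades = []
--     for bid in bids:
--         t = bid.get("trade")
--         if t and t not in catalogue and t not in new_trades:
--             new_trades.append(t)
--     for t in new_trades:
--         first = next(b for b in bids if b.get("trade") == t)
--         catalogue[t] = first.get("scope") or derived(t)
--     return catalogue
-- ===== Notes on version B (the rewrite author's own statement) =====
-- stated objective: alternative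
-- what changed: Replaces A's single accumulating pass per loop with a per-tag gather: B first enumerates the distinct card tags (and the distinct new bid trades), then builds each catalogue entry in one shot by scanning all records for that tag (join of the matching labels, resp. the first matching bid's scope), instead of threading a growing dict through every record.
import Mathlib
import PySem

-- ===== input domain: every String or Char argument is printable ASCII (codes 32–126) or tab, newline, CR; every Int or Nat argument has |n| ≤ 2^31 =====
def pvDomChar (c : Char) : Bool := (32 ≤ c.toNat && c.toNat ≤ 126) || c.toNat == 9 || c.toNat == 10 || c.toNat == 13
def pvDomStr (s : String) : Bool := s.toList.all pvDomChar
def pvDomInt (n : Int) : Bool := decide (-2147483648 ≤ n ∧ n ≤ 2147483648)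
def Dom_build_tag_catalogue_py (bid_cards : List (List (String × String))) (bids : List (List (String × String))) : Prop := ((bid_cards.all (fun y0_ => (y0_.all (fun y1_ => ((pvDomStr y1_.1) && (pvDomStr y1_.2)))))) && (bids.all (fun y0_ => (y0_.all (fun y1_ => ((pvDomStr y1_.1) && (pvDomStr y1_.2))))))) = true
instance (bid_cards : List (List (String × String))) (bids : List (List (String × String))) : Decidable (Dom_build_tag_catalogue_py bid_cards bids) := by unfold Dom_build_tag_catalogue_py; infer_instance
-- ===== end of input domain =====

-- B replaces A's single accumulating pass with a per-tag gather: it first lists the distinct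
-- card tags and new bid trades, then builds each catalogue entry in one shot by scanning the
-- records for that tag (objective: alternative decomposition, not claimed faster).

-- ===== PORT A =====
-- shared helpers: these port Python lines that are IDENTICAL in A and in B

-- card.get(k) on a dict given as an association list (first match)
def dget (d : List (String × String)) (k : String) : Option String :=
  (PySem.Dict.mk d).get? k

-- Python `x or b` for x an Optional[str]: None and "" are falsy
def pyOr (o : Option String) (b : String) : String :=
  match o with
  | none => b
  | some s => if s == "" then b else s

-- str.title(), hand-ported (PySem has no title): a letter is uppercased when the
-- previous character is not a letter, lowercased otherwise; exact on ASCII (the Dom)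
def pyTitleGo : List Char → Bool → List Char
  | [], _ => []
  | c :: rest, prevAlpha =>
      (if PySem.Chars.isalpha c then
        (if prevAlpha then PySem.Chars.lowerChar c else PySem.Chars.upperChar c)
       else c) :: pyTitleGo rest (PySem.Chars.isalpha c)

-- tag.lstrip("@").replace("_", " ").title()   (lstrip("@") = drop leading '@'s, hand-ported, exact)
def derivedLabel (tag : String) : String :=
  String.ofList (pyTitleGo (PySem.Str.replace (String.ofList (tag.toList.dropWhile (fun c => c == '@'))) "_" " ").toList false)

-- the label fallback chain, identical in A and B
def cardLabel (card : List (String × String)) (tag : String) : String :=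
  pyOr (dget card "content") (pyOr (dget card "description")
    (pyOr (dget card "trade_production_notes") (derivedLabel tag)))

-- Python string '+' (ported through lists; Lean's String.append is kernel-opaque)
def strCat (a b : String) : String := String.ofList (a.toList ++ b.toList)

-- A's first loop, one card: first occurrence sets the label, later ones concatenate " / " + label
def stepA (cat : PySem.Dict String String) (card : List (String × String)) : PySem.Dict String String :=
  match dget card "tag" with
  | none => cat
  | some tag =>
      if tag == "" then cat
      else
        let label := cardLabel card tag
        if cat.contains tag then cat.insert tag (strCat (cat.getD tag "") (strCat " / " label))
        else cat.insert tag label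

-- A's second loop (over bids)
def addBids (cat : PySem.Dict String String) (bids : List (List (String × String))) : PySem.Dict String String :=
  bids.foldl (fun cat bid =>
    match dget bid "trade" with
    | none => cat
    | some tag =>
        if tag == "" || cat.contains tag then cat
        else cat.insert tag (pyOr (dget bid "scope") (derivedLabel tag))) cat

def build_tag_catalogue_py (bid_cards : List (List (String × String))) (bids : List (List (String × String))) : List (String × String) :=
  (addBids (bid_cards.foldl stepA PySem.Dict.empty) bids).items

-- ===== PORT B =====
-- first B loop: collect the distinct truthy card tags in first-seen order
def cardTagsStep (acc : List String) (card : List (String × String)) : List String :=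
  match dget card "tag" with
  | none => acc
  | some t => if t == "" || acc.contains t then acc else acc ++ [t]

-- the generator inside B's dict comprehension: all labels of the cards carrying tag t
def labelsFor (bid_cards : List (List (String × String))) (t : String) : List String :=
  (bid_cards.filter (fun c => dget c "tag" == some t)).map (fun c => cardLabel c t)

-- B's new_trades loop, one bid: distinct truthy trades not already in the card catalogue
def ntStep (catalogue : PySem.Dict String String) (acc : List String) (bid : List (String × String)) : List String :=
  match dget bid "trade" with
  | none => acc
  | some t => if t == "" || catalogue.contains t || acc.contains t then acc else acc ++ [t]

-- next(b for b in bids if b.get("trade") == t)  then  first.get("scope") or derived(t)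
-- (the none branch is unreachable: every t fed in occurs in bids)
def firstScope (bids : List (List (String × String))) (t : String) : String :=
  match bids.find? (fun b => dget b "trade" == some t) with
  | some b => pyOr (dget b "scope") (derivedLabel t)
  | none => ""

def build_tag_catalogue_py_alt (bid_cards : List (List (String × String))) (bids : List (List (String × String))) : List (String × String) :=
  let card_tags := bid_cards.foldl cardTagsStep []
  let catalogue := card_tags.foldl
    (fun cat t => cat.insert t (PySem.Str.join " / " (labelsFor bid_cards t))) PySem.Dict.empty
  let new_trades := bids.foldl (ntStep catalogue) []
  (new_trades.foldl (fun cat t => cat.insert t (firstScope bids t)) catalogue).items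

-- ===== PRECONDITION & SPEC =====
def Spec_build_tag_catalogue_py (bid_cards : List (List (String × String))) (bids : List (List (String × String))) (out : List (String × String)) : Prop := out = build_tag_catalogue_py_alt bid_cards bids
instance (bid_cards : List (List (String × String))) (bids : List (List (String × String))) (out : List (String × String)) : Decidable (Spec_build_tag_catalogue_py bid_cards bids out) := by unfold Spec_build_tag_catalogue_py; infer_instance

-- ===== CLAIM (what is proved, stated in full; the proofs are below) =====
def Claim_equal_build_tag_catalogue_py : Prop := ∀ (bid_cards : List (List (String × String))) (bids : List (List (String × String))), Dom_build_tag_catalogue_py bid_cards bids → Spec_build_tag_catalogue_py bid_cards bids (build_tag_catalogue_py bid_cards bids)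

-- ===== LEMMAS AND PROOFS =====

theorem mem_cardTags (cards : List (List (String × String))) (acc : List String) (t : String) :
    t ∈ cards.foldl cardTagsStep acc ↔
      t ∈ acc ∨ (t ≠ "" ∧ ∃ c ∈ cards, dget c "tag" = some t) := by
  induction cards generalizing acc with
  | nil => simp
  | cons c rest ih =>
      simp only [List.foldl_cons, ih]
      unfold cardTagsStep
      cases h : dget c "tag" with
      | none =>
          constructor
          · rintro (h1 | h1); exact Or.inl h1
            · exact Or.inr ⟨h1.1, by obtain ⟨c', hc', ht⟩ := h1.2; exact ⟨c', List.mem_cons_of_mem _ hc', ht⟩⟩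
          · rintro (h1 | ⟨hne, c', hc', ht⟩); exact Or.inl h1
            · rcases List.mem_cons.mp hc' with rfl | hc'
              · rw [h] at ht; cases ht
              · exact Or.inr ⟨hne, c', hc', ht⟩
      | some u =>
          by_cases hu : u == ""
          · have : u = "" := by simpa using hu
            subst this
            simp only [hu, Bool.true_or, if_pos]
            constructor
            · rintro (h1 | h1); exact Or.inl h1
              · exact Or.inr ⟨h1.1, by obtain ⟨c', hc', ht⟩ := h1.2; exact ⟨c', List.mem_cons_of_mem _ hc', ht⟩⟩
            · rintro (h1 | ⟨hne, c', hc', ht⟩); exact Or.inl h1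
              · rcases List.mem_cons.mp hc' with rfl | hc'
                · rw [h] at ht; exact absurd (Option.some.inj ht).symm hne
                · exact Or.inr ⟨hne, c', hc', ht⟩
          · by_cases hacc : acc.contains u
            · simp only [hu, hacc, Bool.false_or, if_pos]
              constructor
              · rintro (h1 | h1); exact Or.inl h1
                · exact Or.inr ⟨h1.1, by obtain ⟨c', hc', ht⟩ := h1.2; exact ⟨c', List.mem_cons_of_mem _ hc', ht⟩⟩
              · rintro (h1 | ⟨hne, c', hc', ht⟩); exact Or.inl h1
                · rcases List.mem_cons.mp hc' with rfl | hc'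
                  · rw [h] at ht
                    have : u = t := Option.some.inj ht
                    subst this
                    exact Or.inl (by simpa using hacc)
                  · exact Or.inr ⟨hne, c', hc', ht⟩
            · simp only [hu, hacc, Bool.or_false, if_neg, Bool.false_eq_true,
                not_false_eq_true]
              constructor
              · rintro (h1 | h1)
                · rcases List.mem_append.mp h1 with h2 | h2
                  · exact Or.inl h2
                  · have : t = u := by simpa using h2
                    subst this
                    exact Or.inr ⟨by simpa using hu, c, List.mem_cons_self, h⟩
                · exact Or.inr ⟨h1.1, by obtain ⟨c', hc', ht⟩ := h1.2; exact ⟨c', List.mem_cons_of_mem _ hc', ht⟩⟩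
              · rintro (h1 | ⟨hne, c', hc', ht⟩)
                · exact Or.inl (List.mem_append.mpr (Or.inl h1))
                · rcases List.mem_cons.mp hc' with rfl | hc'
                  · rw [h] at ht
                    have : u = t := Option.some.inj ht
                    subst this
                    exact Or.inl (by simp)
                  · exact Or.inr ⟨hne, c', hc', ht⟩


theorem nodup_cardTags (cards : List (List (String × String))) (acc : List String)
    (h : acc.Nodup) : (cards.foldl cardTagsStep acc).Nodup := by
  induction cards generalizing acc with
  | nil => exact h
  | cons c rest ih =>
      simp only [List.foldl_cons]
      apply ih
      unfold cardTagsStep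
      cases dget c "tag" with
      | none => exact h
      | some u =>
          by_cases hg : (u == "" || acc.contains u) = true
          · simp only [hg, if_pos]; exact h
          · simp only [hg, Bool.false_eq_true, if_neg, not_false_eq_true]
            refine List.Nodup.append h (by simp) ?_
            intro a ha hb
            simp only [List.mem_singleton] at hb
            subst hb
            simp only [Bool.or_eq_true, not_or, Bool.not_eq_true, List.contains_eq_mem,
              decide_eq_false_iff_not] at hg
            exact hg.2 ha


-- the spec list: what A's first loop produces, and what B's comprehension builds
def specCatList (cards : List (List (String × String))) : List (String × String) :=
  (cards.foldl cardTagsStep []).map (fun t => (t, PySem.Str.join " / " (labelsFor cards t)))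


theorem pred_comp_fst (tag : String) (g : String → String) :
    ((fun q : String × String => q.1 == tag) ∘ fun t : String => (t, g t))
      = fun t : String => t == tag := rfl


theorem get?_mk_map (tags : List String) (g : String → String) (u : String) (h : u ∈ tags) :
    (PySem.Dict.mk (tags.map (fun t => (t, g t)))).get? u = some (g u) := by
  induction tags with
  | nil => cases h
  | cons a rest ih =>
      rw [List.map_cons, PySem.Dict.get?_mk_cons]
      by_cases ha : (a == u) = true
      · have : a = u := by simpa using ha
        subst this
        simp
      · rw [if_neg (by simp [ha])]
        rcases List.mem_cons.mp h with rfl | h'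
        · simp at ha
        · exact ih h'


theorem labelsFor_append (cs : List (List (String × String))) (c : List (String × String)) (t : String) :
    labelsFor (cs ++ [c]) t
      = labelsFor cs t ++ (if dget c "tag" == some t then [cardLabel c t] else []) := by
  simp only [labelsFor, List.filter_append, List.map_append]
  congr 1
  by_cases h : (dget c "tag" == some t) = true <;> simp [List.filter, h]


theorem chars_join_append (sep : List Char) (xs : List (List Char)) (y : List Char) (h : xs ≠ []) :
    PySem.Chars.join sep (xs ++ [y]) = PySem.Chars.join sep xs ++ sep ++ y := by
  induction xs with
  | nil => exact absurd rfl h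
  | cons a rest ih =>
      cases rest with
      | nil => simp [PySem.Chars.join_cons_cons, PySem.Chars.join_singleton]
      | cons b rest' =>
          have ih' := ih (by simp)
          simp only [List.cons_append] at *
          rw [PySem.Chars.join_cons_cons, PySem.Chars.join_cons_cons, ih']
          simp [List.append_assoc]

theorem join_append_singleton (ls : List String) (l : String) (h : ls ≠ []) :
    PySem.Str.join " / " (ls ++ [l]) = strCat (PySem.Str.join " / " ls) (strCat " / " l) := by
  simp only [PySem.Str.join, strCat, String.toList_ofList, List.map_append, List.map_cons,
    List.map_nil]
  rw [chars_join_append _ _ _ (by simpa using h)]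
  simp [List.append_assoc]


theorem loop1 (cards : List (List (String × String))) :
    cards.foldl stepA PySem.Dict.empty = PySem.Dict.mk (specCatList cards) := by
  induction cards using List.reverseRecOn with
  | nil => rfl
  | append_singleton cs c ih =>
      rw [List.foldl_append, ih]
      simp only [List.foldl_cons, List.foldl_nil]
      set tags := cs.foldl cardTagsStep [] with htags
      have hne : ∀ t ∈ tags, t ≠ "" := by
        intro t ht
        exact (((mem_cardTags cs [] t).mp ht).resolve_left (by simp)).1
      have hex : ∀ t ∈ tags, ∃ c' ∈ cs, dget c' "tag" = some t := by
        intro t ht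
        exact (((mem_cardTags cs [] t).mp ht).resolve_left (by simp)).2
      have hcontains : ∀ u, (PySem.Dict.mk (specCatList cs)).contains u = tags.contains u := by
        intro u
        simp only [specCatList, ← htags, PySem.Dict.contains_mk, List.any_map, pred_comp_fst]
        rw [Bool.eq_iff_iff]
        simp only [List.any_eq_true, beq_iff_eq, List.contains_eq_mem, decide_eq_true_eq]
        exact ⟨fun ⟨t, ht, e⟩ => e ▸ ht, fun hm => ⟨u, hm, rfl⟩⟩
      have hspec' : specCatList (cs ++ [c])
          = (cardTagsStep tags c).map (fun t => (t, PySem.Str.join " / " (labelsFor (cs ++ [c]) t))) := by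
        simp only [specCatList, List.foldl_append, List.foldl_cons, List.foldl_nil, htags]
      cases h : dget c "tag" with
      | none =>
          simp only [stepA, h]
          rw [hspec']
          simp only [cardTagsStep, h]
          apply PySem.Dict.ext
          show specCatList cs = _
          simp only [specCatList, ← htags]
          apply List.map_congr_left
          intro t _
          rw [labelsFor_append]
          simp [h]
      | some u =>
          simp only [stepA, h]
          by_cases hu : (u == "") = true
          · rw [if_pos hu, hspec']
            have : u = "" := by simpa using hu
            subst this
            simp only [cardTagsStep, h]
            apply PySem.Dict.ext
            show specCatList cs = _
            simp only [specCatList, ← htags]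
            apply List.map_congr_left
            intro t ht
            rw [labelsFor_append]
            have : (dget c "tag" == some t) = false := by
              rw [h]
              simp only [beq_eq_false_iff_ne, ne_eq, Option.some.injEq]
              exact fun hq => (hne t ht) hq.symm
            simp [this]
          · rw [if_neg (by simp [hu]), hspec']
            by_cases hmem : u ∈ tags
            · have hc : (PySem.Dict.mk (specCatList cs)).contains u = true := by
                rw [hcontains]; simpa using hmem
              rw [if_pos hc]
              -- getD is the joined labels so far
              have hget : (PySem.Dict.mk (specCatList cs)).getD u ""
                  = PySem.Str.join " / " (labelsFor cs u) := by
                rw [PySem.Dict.getD_eq_get?_getD]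
                rw [show specCatList cs
                  = tags.map (fun t => (t, PySem.Str.join " / " (labelsFor cs t))) from rfl]
                rw [get?_mk_map tags _ u hmem]
                rfl
              rw [hget]
              apply PySem.Dict.ext
              rw [PySem.Dict.items_insert_of_contains _ _ hc]
              show (specCatList cs).map _ = _
              simp only [cardTagsStep, h, hu, Bool.false_or,
                show tags.contains u = true from by simpa using hmem, if_pos]
              simp only [specCatList, ← htags, List.map_map]
              apply List.map_congr_left
              intro t ht
              simp only [Function.comp]
              by_cases htu : (t == u) = true
              · have : t = u := by simpa using htu
                subst this
                rw [if_pos htu]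
                have hlne : labelsFor cs t ≠ [] := by
                  obtain ⟨c', hc', htr⟩ := hex t ht
                  simp only [labelsFor, ne_eq, List.map_eq_nil_iff, List.filter_eq_nil_iff]
                  intro hall
                  exact hall c' hc' (by rw [htr]; exact beq_self_eq_true _)
                rw [labelsFor_append,
                  show (dget c "tag" == some t) = true from by rw [h]; exact beq_self_eq_true _]
                rw [show (if (true : Bool) = true then [cardLabel c t] else []) = [cardLabel c t] from rfl]
                rw [join_append_singleton _ _ hlne]
              · rw [if_neg (by simp [htu])]
                rw [labelsFor_append]
                have : (dget c "tag" == some t) = false := by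
                  rw [h]
                  simp only [beq_eq_false_iff_ne, ne_eq, Option.some.injEq]
                  intro hq; subst hq; simp at htu
                simp [this]
            · have hc : (PySem.Dict.mk (specCatList cs)).contains u = false := by
                rw [hcontains]; simpa using hmem
              rw [if_neg (by simp [hc])]
              apply PySem.Dict.ext
              rw [PySem.Dict.items_insert_of_not_contains _ _ hc]
              show specCatList cs ++ _ = _
              simp only [cardTagsStep, h, hu, Bool.false_or,
                show tags.contains u = false from by simpa using hmem, if_neg, Bool.false_eq_true,
                not_false_eq_true]
              rw [List.map_append]
              congr 1
              · simp only [specCatList, ← htags]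
                apply List.map_congr_left
                intro t ht
                rw [labelsFor_append]
                have : (dget c "tag" == some t) = false := by
                  rw [h]
                  simp only [beq_eq_false_iff_ne, ne_eq, Option.some.injEq]
                  intro hq; subst hq; exact hmem ht
                simp [this]
              · -- fresh tag: labelsFor cs u = [] and join of the singleton is the label
                have hlempty : labelsFor cs u = [] := by
                  simp only [labelsFor, List.map_eq_nil_iff, List.filter_eq_nil_iff]
                  intro c' hc' hpred
                  have : dget c' "tag" = some u := by simpa using hpred
                  exact hmem ((mem_cardTags cs [] u).mpr (Or.inr ⟨by simpa using hu, c', hc', this⟩))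
                rw [List.map_cons, List.map_nil, labelsFor_append, hlempty]
                rw [show (dget c "tag" == some u) = true from by rw [h]; exact beq_self_eq_true _]
                simp [PySem.Str.join, PySem.Chars.join_singleton]


theorem contains_insertFold (l : List String) (f : String → String)
    (cat : PySem.Dict String String) (k : String) :
    (l.foldl (fun c t => c.insert t (f t)) cat).contains k
      = (cat.contains k || l.contains k) := by
  induction l generalizing cat with
  | nil => simp
  | cons a rest ih =>
      simp only [List.foldl_cons, ih, PySem.Dict.contains_insert, List.contains_cons]
      cases h : (k == a) <;> simp [Bool.or_comm]

-- membership in the new_trades accumulator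


theorem mem_ntFold (bids : List (List (String × String))) (cat : PySem.Dict String String)
    (acc : List String) (t : String) :
    t ∈ bids.foldl (ntStep cat) acc ↔
      t ∈ acc ∨ (t ≠ "" ∧ cat.contains t = false ∧ ∃ b ∈ bids, dget b "trade" = some t) := by
  induction bids generalizing acc with
  | nil => simp
  | cons b rest ih =>
      simp only [List.foldl_cons, ih]
      unfold ntStep
      cases h : dget b "trade" with
      | none =>
          constructor
          · rintro (h1 | h1); exact Or.inl h1
            · exact Or.inr ⟨h1.1, h1.2.1, by obtain ⟨b', hb', ht⟩ := h1.2.2; exact ⟨b', List.mem_cons_of_mem _ hb', ht⟩⟩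
          · rintro (h1 | ⟨hne, hcc, b', hb', ht⟩); exact Or.inl h1
            · rcases List.mem_cons.mp hb' with rfl | hb'
              · rw [h] at ht; cases ht
              · exact Or.inr ⟨hne, hcc, b', hb', ht⟩
      | some u =>
          by_cases hg : (u == "" || cat.contains u || acc.contains u) = true
          · simp only [hg, if_pos]
            constructor
            · rintro (h1 | h1); exact Or.inl h1
              · exact Or.inr ⟨h1.1, h1.2.1, by obtain ⟨b', hb', ht⟩ := h1.2.2; exact ⟨b', List.mem_cons_of_mem _ hb', ht⟩⟩
            · rintro (h1 | ⟨hne, hcc, b', hb', ht⟩); exact Or.inl h1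
              · rcases List.mem_cons.mp hb' with rfl | hb'
                · rw [h] at ht
                  have : u = t := Option.some.inj ht
                  subst this
                  simp only [Bool.or_eq_true, beq_iff_eq, List.contains_eq_mem, decide_eq_true_eq] at hg
                  rcases hg with (h2 | h2) | h2
                  · exact absurd h2 hne
                  · rw [h2] at hcc; cases hcc
                  · exact Or.inl h2
                · exact Or.inr ⟨hne, hcc, b', hb', ht⟩
          · simp only [hg, Bool.false_eq_true, if_neg, not_false_eq_true]
            simp only [Bool.or_eq_true, not_or, Bool.not_eq_true, List.contains_eq_mem,
              decide_eq_false_iff_not, beq_eq_false_iff_ne] at hg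
            constructor
            · rintro (h1 | h1)
              · rcases List.mem_append.mp h1 with h2 | h2
                · exact Or.inl h2
                · have : t = u := by simpa using h2
                  subst this
                  exact Or.inr ⟨hg.1.1, hg.1.2, b, List.mem_cons_self, h⟩
              · exact Or.inr ⟨h1.1, h1.2.1, by obtain ⟨b', hb', ht⟩ := h1.2.2; exact ⟨b', List.mem_cons_of_mem _ hb', ht⟩⟩
            · rintro (h1 | ⟨hne, hcc, b', hb', ht⟩)
              · exact Or.inl (List.mem_append.mpr (Or.inl h1))
              · rcases List.mem_cons.mp hb' with rfl | hb'
                · rw [h] at ht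
                  have : u = t := Option.some.inj ht
                  subst this
                  exact Or.inl (by simp)
                · exact Or.inr ⟨hne, hcc, b', hb', ht⟩


theorem loop2 (bids : List (List (String × String))) (cat : PySem.Dict String String) :
    addBids cat bids
      = (bids.foldl (ntStep cat) []).foldl (fun c t => c.insert t (firstScope bids t)) cat := by
  induction bids using List.reverseRecOn with
  | nil => rfl
  | append_singleton bs b ih =>
      unfold addBids at *
      rw [List.foldl_append, List.foldl_append, ih]
      simp only [List.foldl_cons, List.foldl_nil]
      -- firstScope stable on members of the old new_trades list
      have hstable : ∀ t ∈ bs.foldl (ntStep cat) [], firstScope (bs ++ [b]) t = firstScope bs t := by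
        intro t ht
        obtain ⟨-, -, b', hb', htr⟩ := ((mem_ntFold bs cat [] t).mp ht).resolve_left (by simp)
        have : (bs.find? (fun b => dget b "trade" == some t)).isSome :=
          List.find?_isSome.mpr ⟨b', hb', by
            show (dget b' "trade" == some t) = true
            rw [htr]; exact beq_self_eq_true _⟩
        obtain ⟨bf, hbf⟩ := Option.isSome_iff_exists.mp this
        unfold firstScope
        rw [List.find?_append, hbf]
        rfl
      have hfold : (bs.foldl (ntStep cat) []).foldl (fun c t => c.insert t (firstScope (bs ++ [b]) t)) cat
          = (bs.foldl (ntStep cat) []).foldl (fun c t => c.insert t (firstScope bs t)) cat := by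
        apply PySem.List.foldl_congr_mem
        intro acc x hx
        rw [hstable x hx]
      set nt := bs.foldl (ntStep cat) [] with hnt
      cases h : dget b "trade" with
      | none =>
          simp only [ntStep, h]
          exact hfold.symm
      | some u =>
          simp only [ntStep, h]
          rw [contains_insertFold]
          by_cases hg : (u == "" || cat.contains u) = true
          · have hg2 : (u == "" || cat.contains u || nt.contains u) = true := by
              simp only [Bool.or_eq_true] at hg ⊢; tauto
            have hg3 : (u == "" || (cat.contains u || nt.contains u)) = true := by
              simp only [Bool.or_eq_true] at hg2 ⊢; tauto
            rw [if_pos hg3, if_pos hg2]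
            exact hfold.symm
          · simp only [Bool.or_eq_true, not_or, Bool.not_eq_true, beq_eq_false_iff_ne] at hg
            by_cases hmem : nt.contains u = true
            · have hg2 : (u == "" || cat.contains u || nt.contains u) = true := by
                simp only [hmem, Bool.or_true]
              have hg3 : (u == "" || (cat.contains u || nt.contains u)) = true := by
                simp only [hmem, Bool.or_true]
              rw [if_pos hg3, if_pos hg2]
              exact hfold.symm
            · simp only [Bool.not_eq_true] at hmem
              have hgu : (u == "") = false := by simpa using hg.1
              have hg2 : (u == "" || cat.contains u || nt.contains u) = false := by
                rw [hgu, hg.2, hmem]; rfl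
              have hg3 : (u == "" || (cat.contains u || nt.contains u)) = false := by
                rw [hgu, hg.2, hmem]; rfl
              rw [hg3, hg2]
              simp only [Bool.false_eq_true, not_false_eq_true, if_neg]
              rw [List.foldl_append, hfold]
              simp only [List.foldl_cons, List.foldl_nil]
              congr 1
              -- firstScope of the fresh trade u is this bid's scope
              have hnone : bs.find? (fun b => dget b "trade" == some u) = none := by
                rw [List.find?_eq_none]
                intro b' hb' hpred
                have htr : dget b' "trade" = some u := by
                  simpa using hpred
                have : u ∈ nt := (mem_ntFold bs cat [] u).mpr
                  (Or.inr ⟨hg.1, hg.2, b', hb', htr⟩)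
                exact absurd (by simpa using this) (by simpa using hmem)
              unfold firstScope
              rw [List.find?_append, hnone]
              simp [h]

-- ===== VERDICT (by name: the statement is the Claim_ definition above) =====
theorem build_tag_catalogue_py_spec : Claim_equal_build_tag_catalogue_py := by
  intro bid_cards bids _
  unfold Spec_build_tag_catalogue_py build_tag_catalogue_py build_tag_catalogue_py_alt
  have hcat : bid_cards.foldl stepA PySem.Dict.empty
      = (bid_cards.foldl cardTagsStep []).foldl
          (fun cat t => cat.insert t (PySem.Str.join " / " (labelsFor bid_cards t)))
          PySem.Dict.empty := by
    rw [loop1]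
    apply PySem.Dict.ext
    rw [PySem.Dict.items_foldl_insert_fresh _ _ _ _
      (by intro a _; exact PySem.Dict.contains_empty a)
      (by simpa using nodup_cardTags bid_cards [] List.nodup_nil)]
    rfl
  rw [loop2, hcat]
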